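-- pv_equiv track=rewrite | github.com/easycodinggithub/Programmers_Python | 왼쪽 오른쪽.py | solution
-- ===== SOURCE A (Python) =====
-- def solution(str_list):
--     if (len(str_list) == 1):
--         return []
--     for i in range(0, len(str_list), 1):
--         if (str_list[i] == 'l'):
--             return str_list[0:i]
--         elif (str_list[i] == 'r'):
--             return str_list[i+1:len(str_list)+1]
-- ===== SOURCE B (Python) =====
-- def solution(str_list):
--     if len(str_list) == 1:
--         return []
--     li = str_list.index('l') if 'l' in str_list else len(str_list) + 1
--     ri = str_list.index('r') if 'r' in str_list else len(str_list) + 1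
--     if li == ri:            # neither marker present
--         return None
--     return str_list[:li] if li < ri else str_list[ri + 1:]
-- ===== Notes on version B (the rewrite author's own statement) =====
-- stated objective: alternative
-- what changed: Replaces A's single indexed scan with interleaved 'l'/'r' branches by two independent first-occurrence lookups (list.index with an out-of-range sentinel) and a position comparison choosing prefix-before-'l' or suffix-after-'r'.
-- outside the precondition, e.g. on solution(['a', 'b']): A returns None, B returns None
import Mathlib
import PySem

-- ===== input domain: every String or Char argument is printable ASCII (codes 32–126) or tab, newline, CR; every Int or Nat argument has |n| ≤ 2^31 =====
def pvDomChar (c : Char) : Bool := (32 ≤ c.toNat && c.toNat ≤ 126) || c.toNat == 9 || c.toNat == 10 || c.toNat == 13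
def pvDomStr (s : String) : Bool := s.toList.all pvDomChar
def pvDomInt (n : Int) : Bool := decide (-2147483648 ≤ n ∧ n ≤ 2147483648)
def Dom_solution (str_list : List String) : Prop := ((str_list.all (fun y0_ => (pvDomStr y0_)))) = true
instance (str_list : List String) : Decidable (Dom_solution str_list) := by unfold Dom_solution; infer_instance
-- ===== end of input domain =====

-- B is an alternative decomposition (two independent marker lookups + comparison), same cost; return-value equivalence only.

-- ===== PORT A =====
-- the 'for i in range(0, len, 1)' loop with early returns; falling off the loop is Python's None, excluded by Pre_
def solutionLoop (xs : List String) (i : Nat) : List String :=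
  if h : i < xs.length then
    if xs[i] = "l" then PySem.List.slice xs (some 0) (some (i : Int))
    else if xs[i] = "r" then PySem.List.slice xs (some ((i : Int) + 1)) (some ((xs.length : Int) + 1))
    else solutionLoop xs (i + 1)
  else []
termination_by xs.length - i

def solution (str_list : List String) : List String :=
  if str_list.length = 1 then [] else solutionLoop str_list 0

-- ===== PORT B =====
def solution_alt (str_list : List String) : List String :=
  if str_list.length = 1 then []
  else
    let li := (PySem.List.index? str_list "l").getD (str_list.length + 1)
    let ri := (PySem.List.index? str_list "r").getD (str_list.length + 1)
    if li = ri then []   -- Python B returns None here; excluded by Pre_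
    else if li < ri then PySem.List.slice str_list none (some (li : Int))
    else PySem.List.slice str_list (some ((ri : Int) + 1)) none

-- ===== PRECONDITION & SPEC =====
-- Pre_ excludes inputs on which A falls off its loop and returns None (not a list): length ≠ 1 with no 'l'/'r' marker; B returns None there too.
def Pre_solution (str_list : List String) : Prop :=
  str_list.length = 1 ∨ "l" ∈ str_list ∨ "r" ∈ str_list
instance (str_list : List String) : Decidable (Pre_solution str_list) := by unfold Pre_solution; infer_instance
def pvWitness_solution : List String := ["a", "l", "b"]

def Spec_solution (str_list : List String) (out : List String) : Prop := out = solution_alt str_list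
instance (str_list : List String) (out : List String) : Decidable (Spec_solution str_list out) := by unfold Spec_solution; infer_instance

-- ===== CLAIM (what is proved, stated in full; the proofs are below) =====
def Claim_equal_solution : Prop := ∀ (str_list : List String), Dom_solution str_list → Pre_solution str_list → Spec_solution str_list (solution str_list)

-- ===== LEMMAS AND PROOFS =====

-- xs[b+1 : len+1] (A's suffix slice, clamped past the end) equals xs[b+1:] (B's)
lemma slice_suffix (xs : List String) (b : Nat) :
    PySem.List.slice xs (some ((b : Int) + 1)) (some ((xs.length : Int) + 1)) =
    PySem.List.slice xs (some ((b : Int) + 1)) none := by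
  have h1 : ((b : Int) + 1) = ((b + 1 : Nat) : Int) := by push_cast; ring
  have h2 : ((xs.length : Int) + 1) = ((xs.length + 1 : Nat) : Int) := by push_cast; ring
  rw [h1, h2, PySem.List.slice_natCast, PySem.List.slice_from_natCast]
  exact List.take_of_length_le (by simp; omega)

-- A's loop started at i, with no marker in positions [i, j) and a marker at j, returns according to the marker at j.
lemma solutionLoop_eq (xs : List String) (i j : Nat) (hij : i ≤ j) (hj : j < xs.length)
    (hmark : xs[j] = "l" ∨ xs[j] = "r")
    (hmin : ∀ k (hk : k < xs.length), i ≤ k → k < j → xs[k]'hk ≠ "l" ∧ xs[k]'hk ≠ "r") :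
    solutionLoop xs i =
      if xs[j] = "l" then PySem.List.slice xs (some 0) (some (j : Int))
      else PySem.List.slice xs (some ((j : Int) + 1)) (some ((xs.length : Int) + 1)) := by
  induction hd : j - i generalizing i with
  | zero =>
    have hji : i = j := by omega
    subst hji
    rw [solutionLoop]
    rcases hmark with h | h <;> simp [hj, h]
  | succ n ih =>
    have hi : i < xs.length := by omega
    have hne := hmin i hi (le_refl _) (by omega)
    rw [solutionLoop]
    simp only [hi, dif_pos]
    rw [if_neg hne.1, if_neg hne.2]
    exact ih (i + 1) (by omega) (fun k hk hk1 hk2 => hmin k hk (by omega) hk2) (by omega)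

theorem solution_spec : Claim_equal_solution := by
  intro xs _ hpre
  unfold Spec_solution solution solution_alt
  by_cases h1 : xs.length = 1
  · simp [h1]
  simp only [h1, if_false]
  rcases hlo : PySem.List.index? xs "l" with _ | a <;>
    rcases hro : PySem.List.index? xs "r" with _ | b
  · -- no marker at all: contradicts Pre_
    exfalso
    rw [PySem.List.index?_eq_none_iff] at hlo hro
    rcases hpre with h | h | h
    · exact h1 h
    · exact hlo h
    · exact hro h
  · -- only 'r' present, first at b
    obtain ⟨hb, hxb, hminb⟩ := PySem.List.getElem_of_index?_eq_some hro
    rw [PySem.List.index?_eq_none_iff] at hlo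
    rw [solutionLoop_eq xs 0 b (Nat.zero_le _) hb (Or.inr hxb)
      (fun k hk _ hkb => ⟨fun h => hlo (h ▸ List.getElem_mem hk), hminb k hkb⟩)]
    have hne : xs[b] ≠ "l" := by rw [hxb]; decide
    simp only [Option.getD_some, Option.getD_none, if_neg hne]
    have h1 : ¬ (xs.length + 1 = b) := by omega
    have h2 : ¬ (xs.length + 1 < b) := by omega
    rw [if_neg h1, if_neg h2, slice_suffix]
  · -- only 'l' present, first at a
    obtain ⟨ha, hxa, hmina⟩ := PySem.List.getElem_of_index?_eq_some hlo
    rw [PySem.List.index?_eq_none_iff] at hro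
    rw [solutionLoop_eq xs 0 a (Nat.zero_le _) ha (Or.inl hxa)
      (fun k hk _ hka => ⟨hmina k hka, fun h => hro (h ▸ List.getElem_mem hk)⟩)]
    simp only [Option.getD_some, Option.getD_none, if_pos hxa]
    have h1 : ¬ (a = xs.length + 1) := by omega
    rw [if_neg h1, if_pos (by omega : a < xs.length + 1), PySem.List.slice_zero_start]
  · -- both present
    obtain ⟨ha, hxa, hmina⟩ := PySem.List.getElem_of_index?_eq_some hlo
    obtain ⟨hb, hxb, hminb⟩ := PySem.List.getElem_of_index?_eq_some hro
    have hab : a ≠ b := fun h => by subst h; rw [hxa] at hxb; exact absurd hxb (by decide)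
    simp only [Option.getD_some, if_neg hab]
    rcases Nat.lt_or_ge a b with hlt | hge
    · -- 'l' comes first
      rw [solutionLoop_eq xs 0 a (Nat.zero_le _) ha (Or.inl hxa)
        (fun k hk _ hka => ⟨hmina k hka, hminb k (by omega)⟩)]
      rw [if_pos hxa, if_pos hlt, PySem.List.slice_zero_start]
    · -- 'r' comes first
      have hblt : b < a := by omega
      have hne : xs[b] ≠ "l" := fun h => absurd (hmina b hblt) (by simp [h])
      rw [solutionLoop_eq xs 0 b (Nat.zero_le _) hb (Or.inr hxb)
        (fun k hk _ hkb => ⟨hmina k (by omega), hminb k hkb⟩)]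
      rw [if_neg hne, if_neg (by omega : ¬ a < b), slice_suffix]
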